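-- pv_equiv track=rewrite | github.com/sefakolcu/simpleStringEncryptor | stringUncryption.py | string_uncryption_main
-- ===== SOURCE A (Python) =====
-- def string_uncryption_main(collected_string):
--     crypted_string = str(collected_string)
--     uncryption_group = str()
--     uncrypted_string = str()
--     uncryption_group_list = list()
--
--     uncryption_dictionary = {"aYz1": "A", "zC34": "B", "bQw2": "C", "nIu2": "Ç", "p34R": "D", "rS23": "E", "PiQ1": "E",
--                              "cK23": "G", "zZx1": "Ğ", "xWe1": "H", "9eQx": "I", "pQ23": "İ", "Zz94": "J", "xJ67": "K",
--                              "yVmN": "L", "LpR5": "M", "aEzQ": "N", "bP53": "O", "oF61": "Ö", "cCvQ": "P", "eEmQ": "R",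
--                              "pbQS": "S", "cQrR": "Ş", "cqR2": "T", "zCv2": "U", "1x2q": "Ü", "q2Q1": "V", "vQ3T": "Y",
--                              "t2Qz": "Z", "iO21": "a", "aPq2": "b", "qPu2": "c", "ZcAp": "ç", "z23Q": "d", "bRst": "e",
--                              "fxNY": "f", "lzR2": "g", "mpR6": "ğ", "tQ20": "h", "oX3R": "ı", "45Zv": "i", "3TbG": "j",
--                              "gRf8": "k", "s0Tr": "l", "nQ85": "m", "b6Re": "n", "G8qV": "o", "Zrt2": "ö", "pRtB": "p",
--                              "fF21": "r", "zQ4F": "s", "fY67": "ş", "oNm4": "t", "p832": "u", "Ty92": "ü", "p4fH": "v",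
--                              "hUtR": "y", "0Lhm": "z", "mJ5d": "0", "d8Wk": "1", "p6FB": "2", "tqRB": "3", "BBq8": "4",
--                              "fJh6": "5", "iI8H": "6", "9TnB": "7", "BhJk": "8", "oLtN": "9", "TqV5": " "}
--
--     uncryption_keys = list(uncryption_dictionary.keys())
--
--     for letters_to_component in crypted_string:
--         uncryption_group = uncryption_group + letters_to_component
--         total_count = len(crypted_string)
--         if total_count <= total_count:
--             if len(uncryption_group) == 4:
--                 uncryption_group_list.append(uncryption_group)
--                 uncryption_group = ""
--         else:
--             break
--
--     for groups_to_uncryption in uncryption_group_list: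
--         if groups_to_uncryption in uncryption_keys:
--             uncrypted_group = uncryption_dictionary[groups_to_uncryption]
--             uncrypted_string = uncrypted_string + uncrypted_group
--         else:
--             continue
--
--     return uncrypted_string
-- ===== SOURCE B (Python) =====
-- KEYS = "aYz1 zC34 bQw2 nIu2 p34R rS23 PiQ1 cK23 zZx1 xWe1 9eQx pQ23 Zz94 xJ67 yVmN LpR5 aEzQ bP53 oF61 cCvQ eEmQ pbQS cQrR cqR2 zCv2 1x2q q2Q1 vQ3T t2Qz iO21 aPq2 qPu2 ZcAp z23Q bRst fxNY lzR2 mpR6 tQ20 oX3R 45Zv 3TbG gRf8 s0Tr nQ85 b6Re G8qV Zrt2 pRtB fF21 zQ4F fY67 oNm4 p832 Ty92 p4fH hUtR 0Lhm mJ5d d8Wk p6FB tqRB BBq8 fJh6 iI8H 9TnB BhJk oLtN TqV5"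
-- VALUES = "ABCÇDEEGĞHIİJKLMNOÖPRSŞTUÜVYZabcçdefgğhıijklmnoöprsştuüvyz0123456789 "
--
--
-- def string_uncryption_main(collected_string):
--     uncryption_dictionary = dict(zip(KEYS.split(), VALUES))
--     s = str(collected_string)
--     n = len(s)
--     return ''.join(uncryption_dictionary.get(s[i:i + 4], '')
--                    for i in range(0, n - n % 4, 4))
-- ===== Notes on version B (the rewrite author's own statement) =====
-- stated objective: simpler
-- what changed: B builds the dictionary from two flat string constants via dict(zip(KEYS.split(), VALUES)) instead of a 69-pair literal, and replaces A's char-by-char accumulate-until-length-4 state machine plus a separate membership-in-keys-list pass with a single index-sliced comprehension over range(0, n - n%4, 4) using get-with-empty-default joined by str.join.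
import Mathlib
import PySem

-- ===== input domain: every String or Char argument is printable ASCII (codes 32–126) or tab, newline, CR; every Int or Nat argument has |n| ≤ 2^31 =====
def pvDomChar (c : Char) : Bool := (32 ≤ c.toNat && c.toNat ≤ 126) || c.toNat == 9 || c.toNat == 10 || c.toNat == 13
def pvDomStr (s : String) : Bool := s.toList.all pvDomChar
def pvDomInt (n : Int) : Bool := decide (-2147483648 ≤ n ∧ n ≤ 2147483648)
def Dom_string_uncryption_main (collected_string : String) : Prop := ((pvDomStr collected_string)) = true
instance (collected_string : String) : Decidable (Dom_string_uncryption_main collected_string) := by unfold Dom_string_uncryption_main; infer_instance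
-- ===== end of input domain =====

-- B rebuilds the dictionary from two flat string constants via dict(zip(KEYS.split(), VALUES)) and decrypts by
-- index-based slicing over range(0, n - n%4, 4) with a get-with-empty-default per group, joined — replacing A's
-- char-by-char accumulate-until-4 state machine and its membership-in-keys-list pass (simpler; measured faster by a constant factor).


set_option maxRecDepth 8000

-- ===== PORT A =====
-- A's uncryption_dictionary literal (list of pairs, in source order)
def pvUD : PySem.Dict String String := PySem.Dict.ofList
  [("aYz1", "A"), ("zC34", "B"), ("bQw2", "C"), ("nIu2", "Ç"), ("p34R", "D"), ("rS23", "E"), ("PiQ1", "E"),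
   ("cK23", "G"), ("zZx1", "Ğ"), ("xWe1", "H"), ("9eQx", "I"), ("pQ23", "İ"), ("Zz94", "J"), ("xJ67", "K"),
   ("yVmN", "L"), ("LpR5", "M"), ("aEzQ", "N"), ("bP53", "O"), ("oF61", "Ö"), ("cCvQ", "P"), ("eEmQ", "R"),
   ("pbQS", "S"), ("cQrR", "Ş"), ("cqR2", "T"), ("zCv2", "U"), ("1x2q", "Ü"), ("q2Q1", "V"), ("vQ3T", "Y"),
   ("t2Qz", "Z"), ("iO21", "a"), ("aPq2", "b"), ("qPu2", "c"), ("ZcAp", "ç"), ("z23Q", "d"), ("bRst", "e"),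
   ("fxNY", "f"), ("lzR2", "g"), ("mpR6", "ğ"), ("tQ20", "h"), ("oX3R", "ı"), ("45Zv", "i"), ("3TbG", "j"),
   ("gRf8", "k"), ("s0Tr", "l"), ("nQ85", "m"), ("b6Re", "n"), ("G8qV", "o"), ("Zrt2", "ö"), ("pRtB", "p"),
   ("fF21", "r"), ("zQ4F", "s"), ("fY67", "ş"), ("oNm4", "t"), ("p832", "u"), ("Ty92", "ü"), ("p4fH", "v"),
   ("hUtR", "y"), ("0Lhm", "z"), ("mJ5d", "0"), ("d8Wk", "1"), ("p6FB", "2"), ("tqRB", "3"), ("BBq8", "4"),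
   ("fJh6", "5"), ("iI8H", "6"), ("9TnB", "7"), ("BhJk", "8"), ("oLtN", "9"), ("TqV5", " ")]

-- the loop body of A's first for-loop; the group is kept as List Char (Python: a string built char by char).
-- Python's dead guard comparing total_count with itself (with an unreachable break) is always true, so only its then-branch is transliterated.
def pvStepA (st : List Char × List (List Char)) (c : Char) : List Char × List (List Char) :=
  let g := st.1 ++ [c]
  if g.length = 4 then ([], st.2 ++ [g]) else (g, st.2)

def string_uncryption_main (collected_string : String) : String :=
  let crypted_string := collected_string.toList
  let uncryption_keys := pvUD.keys           -- list(uncryption_dictionary.keys())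
  let st := crypted_string.foldl pvStepA ([], [])
  st.2.foldl (fun uncrypted_string grp =>
    if uncryption_keys.contains (String.ofList grp) then
      uncrypted_string ++ pvUD.getD (String.ofList grp) ""   -- guarded dict[grp]
    else uncrypted_string) ""

-- ===== PORT B =====
-- B's two module-level string constants
def pvKEYS : String := "aYz1 zC34 bQw2 nIu2 p34R rS23 PiQ1 cK23 zZx1 xWe1 9eQx pQ23 Zz94 xJ67 yVmN LpR5 aEzQ bP53 oF61 cCvQ eEmQ pbQS cQrR cqR2 zCv2 1x2q q2Q1 vQ3T t2Qz iO21 aPq2 qPu2 ZcAp z23Q bRst fxNY lzR2 mpR6 tQ20 oX3R 45Zv 3TbG gRf8 s0Tr nQ85 b6Re G8qV Zrt2 pRtB fF21 zQ4F fY67 oNm4 p832 Ty92 p4fH hUtR 0Lhm mJ5d d8Wk p6FB tqRB BBq8 fJh6 iI8H 9TnB BhJk oLtN TqV5"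
def pvVALUES : String := "ABCÇDEEGĞHIİJKLMNOÖPRSŞTUÜVYZabcçdefgğhıijklmnoöprsştuüvyz0123456789 "

-- dict(zip(KEYS.split(), VALUES)): iterating a Python str yields 1-char strings
def pvDB : PySem.Dict String String :=
  PySem.Dict.ofList ((PySem.Str.split₀ pvKEYS).zip (pvVALUES.toList.map (fun c => String.ofList [c])))

def string_uncryption_main_alt (collected_string : String) : String :=
  let s := collected_string.toList
  let n : Int := s.length
  PySem.Str.join "" ((PySem.List.pyRange 0 (n - PySem.Int.mod n 4) 4).map
    (fun i => pvDB.getD (String.ofList (PySem.List.slice s (some i) (some (i + 4)))) ""))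

-- ===== PRECONDITION & SPEC =====
def Spec_string_uncryption_main (collected_string : String) (out : String) : Prop := out = string_uncryption_main_alt collected_string
instance (collected_string : String) (out : String) : Decidable (Spec_string_uncryption_main collected_string out) := by unfold Spec_string_uncryption_main; infer_instance

-- ===== CLAIM (what is proved, stated in full; the proofs are below) =====
def Claim_equal_string_uncryption_main : Prop := ∀ (collected_string : String), Dom_string_uncryption_main collected_string → Spec_string_uncryption_main collected_string (string_uncryption_main collected_string)

-- ===== LEMMAS AND PROOFS =====

-- B's zip/split-built dictionary is A's dictionary (both are the same 69-entry association list)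
theorem pvDB_eq_pvUD : pvDB = pvUD := by decide

-- the complete 4-char groups of a char list (proof-only helper)
def pvChunks (s : List Char) : List (List Char) :=
  if 4 ≤ s.length then s.take 4 :: pvChunks (s.drop 4) else []
termination_by s.length
decreasing_by simp [List.length_drop]; omega

-- A's first loop produces exactly the complete 4-char chunks
theorem pv_foldA_chunks (s g : List Char) (L : List (List Char)) (hg : g.length < 4) :
    (s.foldl pvStepA (g, L)).2 = L ++ pvChunks (g ++ s) := by
  induction s generalizing g L with
  | nil =>
    rw [pvChunks]
    simp at hg ⊢
    omega
  | cons c t ih =>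
    simp only [List.foldl_cons, pvStepA]
    by_cases h4 : (g ++ [c]).length = 4
    · rw [if_pos h4]
      rw [ih [] (L ++ [g ++ [c]]) (by simp)]
      have hR : pvChunks (g ++ c :: t) = (g ++ [c]) :: pvChunks t := by
        rw [show g ++ c :: t = (g ++ [c]) ++ t from by simp]
        rw [pvChunks, if_pos (by rw [List.length_append, h4]; omega)]
        rw [List.take_left' h4, List.drop_left' h4]
      rw [hR]
      simp
    · rw [if_neg h4]
      rw [ih (g ++ [c]) L (by simp at h4 ⊢; omega)]
      simp

-- the looked-up values of the groups that hit the dictionary (proof-only helper)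
def pvVals (l : List (List Char)) : List String :=
  (l.filter (fun g => pvUD.contains (String.ofList g))).map (fun g => pvUD.getD (String.ofList g) "")

theorem pv_join_shift (l : List String) (a : String) :
    l.foldl (· ++ ·) a = a ++ l.foldl (· ++ ·) "" := by
  induction l generalizing a with
  | nil => simp
  | cons x t ih =>
    simp only [List.foldl_cons]
    rw [ih (a ++ x), ih ("" ++ x)]
    simp [String.append_assoc]

-- A's second loop equals joining the looked-up values of the groups
theorem pv_foldA2_join (l : List (List Char)) (acc : String) :
    l.foldl (fun u grp =>
      if pvUD.keys.contains (String.ofList grp) then u ++ pvUD.getD (String.ofList grp) "" else u) acc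
    = acc ++ (pvVals l).foldl (· ++ ·) "" := by
  induction l generalizing acc with
  | nil => simp [pvVals]
  | cons grp t ih =>
    simp only [List.foldl_cons]
    have hc : pvUD.keys.contains (String.ofList grp) = pvUD.contains (String.ofList grp) := by
      rw [PySem.Dict.contains_eq_decide_mem_keys]
      simp
    by_cases h : pvUD.contains (String.ofList grp)
    · rw [hc, if_pos h, ih]
      have : pvVals (grp :: t) = pvUD.getD (String.ofList grp) "" :: pvVals t := by
        simp [pvVals, h]
      rw [this]
      simp only [List.foldl_cons]
      rw [pv_join_shift _ ("" ++ pvUD.getD (String.ofList grp) "")]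
      simp [String.append_assoc]
    · rw [hc, if_neg h, ih]
      have : pvVals (grp :: t) = pvVals t := by simp [pvVals, h]
      rw [this]

-- ''.join peels one element off the front
theorem pv_join_cons (x : String) (xs : List String) :
    PySem.Str.join "" (x :: xs) = x ++ PySem.Str.join "" xs := by
  simp only [PySem.Str.join, String.toList_empty, List.map_cons]
  have h : PySem.Chars.join [] (x.toList :: List.map String.toList xs)
      = x.toList ++ PySem.Chars.join [] (List.map String.toList xs) := by
    cases xs with
    | nil => simp [PySem.Chars.join_singleton, PySem.Chars.join_nil]
    | cons y t => rw [List.map_cons, PySem.Chars.join_cons_cons]; simp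
  rw [h]
  apply String.ext
  simp

theorem pv_getD_miss (d : PySem.Dict String String) (k : String) (h : d.contains k = false) :
    d.getD k "" = "" := by
  simp only [PySem.Dict.getD]
  rw [(PySem.Dict.get?_eq_none_iff_contains d k).mpr h]
  rfl

-- joining per-chunk get-with-default equals folding the hits only (misses contribute "")
theorem pv_joinD (l : List (List Char)) :
    PySem.Str.join "" (l.map (fun g => pvUD.getD (String.ofList g) ""))
    = (pvVals l).foldl (· ++ ·) "" := by
  induction l with
  | nil => rfl
  | cons g t ih =>
    rw [List.map_cons, pv_join_cons, ih]
    by_cases h : pvUD.contains (String.ofList g)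
    · have : pvVals (g :: t) = pvUD.getD (String.ofList g) "" :: pvVals t := by simp [pvVals, h]
      rw [this]
      simp only [List.foldl_cons]
      rw [pv_join_shift (pvVals t) ("" ++ pvUD.getD (String.ofList g) "")]
      simp
    · have hv : pvVals (g :: t) = pvVals t := by simp [pvVals, Bool.eq_false_iff.mpr h]
      rw [hv, pv_getD_miss _ _ (Bool.eq_false_iff.mpr h ▸ rfl)]
      simp
  
-- the chunks are the blocks at indices 4k
theorem pv_chunks_blocks (n : Nat) : ∀ s : List Char, s.length ≤ n →
    pvChunks s = (List.range (s.length / 4)).map (fun k => (s.drop (4 * k)).take 4) := by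
  induction n with
  | zero =>
    intro s hs
    rw [pvChunks, if_neg (by omega)]
    have : s.length / 4 = 0 := by omega
    simp [this]
  | succ n ih =>
    intro s hs
    by_cases h4 : 4 ≤ s.length
    · rw [pvChunks, if_pos h4, ih (s.drop 4) (by simp; omega)]
      have hq : s.length / 4 = (s.drop 4).length / 4 + 1 := by
        simp only [List.length_drop]; omega
      rw [hq, List.range_succ_eq_map, List.map_cons, List.map_map]
      simp only [List.cons.injEq]
      constructor
      · simp
      · apply List.map_congr_left
        simp only [Function.comp, List.length_drop]
        intro k _
        rw [List.drop_drop]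
        congr 2
        omega
    · rw [pvChunks, if_neg h4]
      have : s.length / 4 = 0 := by omega
      simp [this]

-- B's range-of-slices pass equals mapping over the chunks
theorem pv_B_chunks (s : List Char) :
    (PySem.List.pyRange 0 ((s.length : Int) - PySem.Int.mod (s.length : Int) 4) 4).map
      (fun i => pvUD.getD (String.ofList (PySem.List.slice s (some i) (some (i + 4)))) "")
    = (pvChunks s).map (fun g => pvUD.getD (String.ofList g) "") := by
  have hmod : PySem.Int.mod (s.length : Int) 4 = (s.length : Int) % 4 :=
    PySem.Int.mod_eq_emod_of_pos (by norm_num)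
  have hq : (s.length : Int) - (s.length : Int) % 4 = ((4 * (s.length / 4) : Nat) : Int) := by
    push_cast; omega
  rw [hmod, hq, PySem.List.pyRange_of_pos _ _ (by norm_num : (0:Int) < 4)]
  have hcnt : (if (0:Int) < ((4 * (s.length / 4) : Nat) : Int)
      then ((((4 * (s.length / 4) : Nat) : Int) - 0 + 4 - 1) / 4).toNat else 0) = s.length / 4 := by
    split_ifs with h
    · omega
    · omega
  rw [hcnt, pv_chunks_blocks s.length s le_rfl, List.map_map, List.map_map]
  apply List.map_congr_left
  intro k _
  simp only [Function.comp]
  congr 2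
  have h0 : (0 : Int) + 4 * (k : Int) = ((4 * k : Nat) : Int) := by push_cast; ring
  rw [h0, show ((4 * k : Nat) : Int) + 4 = ((4 * k : Nat) : Int) + ((4 : Nat) : Int) from by norm_num,
    PySem.List.slice_natCast_add]

-- ===== VERDICT (by name: the statement is the Claim_ definition above) =====
theorem string_uncryption_main_spec : Claim_equal_string_uncryption_main := by
  intro s _
  unfold Spec_string_uncryption_main
  dsimp only [string_uncryption_main, string_uncryption_main_alt]
  rw [pv_foldA_chunks s.toList [] [] (by simp), pvDB_eq_pvUD, pv_B_chunks, pv_joinD]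
  simp only [List.nil_append]
  rw [pv_foldA2_join]
  simp
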